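-- pv_equiv track=rewrite | github.com/ldeer90/domian-dealer | tools/enrich_domain_migrations.py | extract_domain_tld
-- ===== SOURCE A (Python) =====
-- SECOND_LEVEL_PREFIXES = {"ac", "co", "com", "edu", "gov", "net", "org"}
--
-- def clean_text(value: str) -> str:
--     return " ".join((value or "").replace("\ufeff", "").strip().split())
--
-- def normalise_domain(value: str) -> str:
--     domain = clean_text(value).lower()
--     if not domain:
--         return ""
--     domain = domain.removeprefix("http://").removeprefix("https://")
--     domain = domain.split("/", 1)[0].split("?", 1)[0].split("#", 1)[0]
--     domain = domain.strip(".")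
--     domain = domain.removeprefix("www.")
--     return domain
--
-- def extract_root_domain(domain: str) -> str:
--     normalized = normalise_domain(domain)
--     labels = [part for part in normalized.split(".") if part]
--     if len(labels) <= 2:
--         return normalized
--     if len(labels[-1]) == 2 and labels[-2] in SECOND_LEVEL_PREFIXES and len(labels) >= 3:
--         return ".".join(labels[-3:])
--     return ".".join(labels[-2:])
--
-- def extract_domain_tld(domain: str) -> str:
--     root = extract_root_domain(domain)
--     parts = [part for part in root.split(".") if part]
--     if len(parts) <= 1:
--         return ""
--     if len(parts[-1]) == 2 and len(parts[-2]) <= 3: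
--         return ".".join(parts[-2:])
--     return parts[-1]
-- ===== SOURCE B (Python) =====
-- def _tld_from(labels):
--     if len(labels) < 2:
--         return ""
--     p, t = labels[-2], labels[-1]
--     return f"{p}.{t}" if len(t) == 2 and len(p) <= 3 else t
--
-- def extract_domain_tld(domain: str) -> str:
--     # One direct pass: normalise, split into labels once, decide from the last two labels.
--     s = " ".join((domain or "").replace("\ufeff", "").strip().split()).lower()
--     s = s.removeprefix("http://").removeprefix("https://")
--     head = []
--     for c in s:
--         if c in "/?#":
--             break
--         head.append(c)
--     s = "".join(head).strip(".")
--     if s.startswith("www."):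
--         s = s[4:]
--     labels = [p for p in s.split(".") if p]
--     return _tld_from(labels)
-- ===== Notes on version B (the rewrite author's own statement) =====
-- stated objective: simpler
-- what changed: B inlines the whole pipeline into one direct pass: it normalises the string, cuts at the first URL delimiter with a single scan instead of three sequential splits, splits into non-empty labels once, and decides the TLD straight from the last two labels, eliminating the extract_root_domain join/re-split round trip and the second-level prefix set entirely.
import Mathlib
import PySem

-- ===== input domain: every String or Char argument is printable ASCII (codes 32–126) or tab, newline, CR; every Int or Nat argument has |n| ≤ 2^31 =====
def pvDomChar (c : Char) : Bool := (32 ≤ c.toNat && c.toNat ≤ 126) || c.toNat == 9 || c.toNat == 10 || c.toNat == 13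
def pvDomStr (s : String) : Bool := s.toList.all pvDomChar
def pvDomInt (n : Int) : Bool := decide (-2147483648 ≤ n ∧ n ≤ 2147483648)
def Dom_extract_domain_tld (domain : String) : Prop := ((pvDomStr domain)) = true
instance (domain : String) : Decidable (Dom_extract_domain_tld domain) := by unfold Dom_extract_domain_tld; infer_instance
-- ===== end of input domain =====

-- B inlines A's normalise / root-extraction / TLD pipeline into one direct pass over the labels
-- (objective: simpler); return values are proved identical on every input.

-- ===== PORT A =====

-- 'value or ""' is the identity on a str argument; ported as the argument itself.
def cleanTextA (v : List Char) : List Char :=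
  PySem.Chars.join [' '] (PySem.Chars.split₀ (PySem.Chars.strip (PySem.Chars.replace v ['\ufeff'] [])))

-- s.removeprefix(p)
def removeprefixPy (s p : List Char) : List Char :=
  if PySem.Chars.startswith s p then s.drop p.length else s

def normaliseDomainA (v : List Char) : List Char :=
  let d := PySem.Chars.lower (cleanTextA v)
  if d = [] then []
  else
    let d := removeprefixPy (removeprefixPy d "http://".toList) "https://".toList
    let d := (PySem.Chars.splitOnMax d ['/'] 1).headD []
    let d := (PySem.Chars.splitOnMax d ['?'] 1).headD []
    let d := (PySem.Chars.splitOnMax d ['#'] 1).headD []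
    let d := PySem.Chars.stripChars d ['.']
    removeprefixPy d "www.".toList

def secondLevelPrefixesA : PySem.Set (List Char) :=
  PySem.Set.ofList ["ac".toList, "co".toList, "com".toList, "edu".toList, "gov".toList, "net".toList, "org".toList]

-- body of extract_root_domain after 'normalized' has been computed
def rootAuxA (normalized : List Char) : List Char :=
  let labels := (PySem.Chars.splitOn normalized ['.']).filter (fun p => !p.isEmpty)
  if labels.length ≤ 2 then normalized
  else if (PySem.List.pyGetD labels (-1) []).length == 2
          && PySem.Set.contains secondLevelPrefixesA (PySem.List.pyGetD labels (-2) [])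
          && 3 ≤ labels.length then
    PySem.Chars.join ['.'] (PySem.List.slice labels (some (-3)) none)
  else
    PySem.Chars.join ['.'] (PySem.List.slice labels (some (-2)) none)

def extractRootDomainA (v : List Char) : List Char :=
  rootAuxA (normaliseDomainA v)

-- body of extract_domain_tld after 'root' has been computed
def tldAuxA (root : List Char) : List Char :=
  let parts := (PySem.Chars.splitOn root ['.']).filter (fun p => !p.isEmpty)
  if parts.length ≤ 1 then []
  else if (PySem.List.pyGetD parts (-1) []).length == 2
          && (PySem.List.pyGetD parts (-2) []).length ≤ 3 then
    PySem.Chars.join ['.'] (PySem.List.slice parts (some (-2)) none)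
  else PySem.List.pyGetD parts (-1) []

def extract_domain_tld (domain : String) : String :=
  String.ofList (tldAuxA (extractRootDomainA domain.toList))

-- ===== PORT B =====

-- helper _tld_from of Source B: decide the TLD from the last two labels
def tldTailB (labels : List (List Char)) : List Char :=
  match labels.reverse with
  | t :: p :: _ => if t.length == 2 && p.length ≤ 3 then p ++ '.' :: t else t
  | _ => []

def tldCharsB (v : List Char) : List Char :=
  let s := PySem.Chars.lower
    (PySem.Chars.join [' '] (PySem.Chars.split₀ (PySem.Chars.strip (PySem.Chars.replace v ['\ufeff'] []))))
  let s := removeprefixPy (removeprefixPy s "http://".toList) "https://".toList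
  -- the for/break loop collecting chars until the first of '/', '?', '#'
  let s := s.takeWhile (fun c => !(c == '/' || c == '?' || c == '#'))
  let s := PySem.Chars.stripChars s ['.']
  let s := if PySem.Chars.startswith s "www.".toList then s.drop 4 else s
  let labels := (PySem.Chars.splitOn s ['.']).filter (fun p => !p.isEmpty)
  tldTailB labels

def extract_domain_tld_alt (domain : String) : String :=
  String.ofList (tldCharsB domain.toList)

-- ===== PRECONDITION & SPEC =====
def Spec_extract_domain_tld (domain : String) (out : String) : Prop := out = extract_domain_tld_alt domain
instance (domain : String) (out : String) : Decidable (Spec_extract_domain_tld domain out) := by unfold Spec_extract_domain_tld; infer_instance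

-- ===== CLAIM (what is proved, stated in full; the proofs are below) =====
def Claim_equal_extract_domain_tld : Prop := ∀ (domain : String), Dom_extract_domain_tld domain → Spec_extract_domain_tld domain (extract_domain_tld domain)

-- ===== LEMMAS AND PROOFS =====

-- clean structural model of s.split(".") used to reason about PySem.Chars.splitOn
def dotSplit (pre : List Char) : List Char → List (List Char)
  | [] => [pre]
  | c :: t => if c = '.' then pre :: dotSplit [] t else dotSplit (pre ++ [c]) t

lemma dotSplit_nil (pre : List Char) : dotSplit pre [] = [pre] := rfl
lemma dotSplit_cons (pre : List Char) (c : Char) (t : List Char) :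
    dotSplit pre (c :: t) = if c = '.' then pre :: dotSplit [] t else dotSplit (pre ++ [c]) t := rfl

lemma splitOn_go_eq_dotSplit :
    ∀ (l : List Char) (fuel : Nat) (cur : List Char) (acc : List (List Char)),
      l.length < fuel →
      PySem.Chars.splitOn.go ['.'] fuel l cur acc = acc.reverse ++ dotSplit cur.reverse l := by
  intro l
  induction l with
  | nil =>
    intro fuel cur acc h
    match fuel, h with
    | f + 1, _ => simp [PySem.Chars.splitOn.go, dotSplit_nil]
  | cons c rest ih =>
    intro fuel cur acc h
    match fuel, h with
    | f + 1, h =>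
      rw [PySem.Chars.splitOn.go]
      by_cases hc : c = '.'
      · subst hc
        rw [if_pos (by simp [List.isPrefixOf])]
        rw [show List.drop (['.'] : List Char).length ('.' :: rest) = rest from rfl]
        rw [ih _ _ _ (by simpa using h)]
        rw [dotSplit_cons, if_pos rfl]
        simp
      · rw [if_neg (by
          rw [show (['.'] : List Char).isPrefixOf (c :: rest) = (('.' == c) && List.isPrefixOf [] rest) from rfl]
          simp; exact fun h => hc h.symm)]
        rw [ih _ _ _ (by simpa using h)]
        rw [dotSplit_cons, if_neg hc]
        simp

lemma splitOn_eq_dotSplit (s : List Char) :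
    PySem.Chars.splitOn s ['.'] = dotSplit [] s := by
  rw [PySem.Chars.splitOn, splitOn_go_eq_dotSplit s (s.length+1) [] [] (by omega)]
  simp

lemma dotSplit_dotfree (pre l : List Char) (hpre : '.' ∉ pre) :
    ∀ x ∈ dotSplit pre l, '.' ∉ x := by
  induction l generalizing pre with
  | nil => simpa [dotSplit_nil] using hpre
  | cons c t ih =>
    by_cases hc : c = '.'
    · subst hc
      rw [dotSplit_cons, if_pos rfl]
      intro x hx
      rcases List.mem_cons.mp hx with rfl | hx
      · exact hpre
      · exact ih [] (by simp) x hx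
    · rw [dotSplit_cons, if_neg hc]
      exact ih (pre ++ [c]) (by simp [hpre]; exact fun h => hc h.symm)

lemma dotSplit_append_dotfree (a : List Char) (ha : '.' ∉ a) (pre r : List Char) :
    dotSplit pre (a ++ r) = dotSplit (pre ++ a) r := by
  induction a generalizing pre with
  | nil => simp
  | cons c t ih =>
    have hc : c ≠ '.' := by rintro rfl; simp at ha
    rw [List.cons_append, dotSplit_cons, if_neg hc]
    rw [ih (by simp at ha; tauto)]
    simp

lemma dotSplit_join (L : List (List Char)) (hL : L ≠ []) (hdf : ∀ x ∈ L, '.' ∉ x) :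
    dotSplit [] (PySem.Chars.join ['.'] L) = L := by
  induction L with
  | nil => simp at hL
  | cons a rest ih =>
    match rest with
    | [] =>
      show dotSplit [] (PySem.Chars.join ['.'] [a]) = [a]
      rw [show PySem.Chars.join ['.'] [a] = a from by simp [PySem.Chars.join, List.intercalate, List.intersperse]]
      rw [show (a : List Char) = a ++ [] from by simp, dotSplit_append_dotfree a (hdf a (by simp))]
      simp [dotSplit_nil]
    | b :: rest' =>
      rw [PySem.Chars.join_cons_cons, List.append_assoc]
      rw [dotSplit_append_dotfree a (hdf a (by simp)) [] _]
      rw [List.nil_append, List.singleton_append, dotSplit_cons, if_pos rfl]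
      rw [ih (by simp) (fun x hx => hdf x (by simp [hx]))]

lemma splitOnMax_go_headD_acc (c : Char) (a0 : List Char) :
    ∀ (fuel m : Nat) (l cur : List Char) (acc' : List (List Char)),
      (PySem.Chars.splitOnMax.go [c] fuel m l cur (acc' ++ [a0])).headD [] = a0 := by
  intro fuel
  induction fuel with
  | zero => intro m l cur acc'; rw [PySem.Chars.splitOnMax.go]; simp
  | succ f ih =>
    intro m l cur acc'
    match l with
    | [] => rw [PySem.Chars.splitOnMax.go]; simp; omega
    | ch :: rest =>
      rw [PySem.Chars.splitOnMax.go]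
      by_cases hm : m = 0
      · rw [if_pos hm]; simp
      · rw [if_neg hm]
        by_cases hp : ([c] : List Char).isPrefixOf (ch :: rest)
        · rw [if_pos hp]
          rw [show (cur.reverse :: (acc' ++ [a0])) = (cur.reverse :: acc') ++ [a0] from rfl]
          exact ih _ _ _ _
        · rw [if_neg hp]; exact ih _ _ _ _

lemma splitOnMax_go_headD (c : Char) :
    ∀ (l : List Char) (fuel : Nat) (cur : List Char),
      l.length < fuel →
      (PySem.Chars.splitOnMax.go [c] fuel 1 l cur []).headD []
        = cur.reverse ++ l.takeWhile (fun a => !(a == c)) := by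
  intro l
  induction l with
  | nil =>
    intro fuel cur h
    match fuel, h with
    | f + 1, _ => rw [PySem.Chars.splitOnMax.go]; simp; omega
  | cons ch rest ih =>
    intro fuel cur h
    match fuel, h with
    | f + 1, h =>
      rw [PySem.Chars.splitOnMax.go]
      rw [if_neg (by norm_num)]
      by_cases hc : ch = c
      · subst hc
        rw [if_pos (by simp [List.isPrefixOf])]
        rw [show List.drop ([ch] : List Char).length (ch :: rest) = rest from rfl]
        rw [show (cur.reverse :: ([] : List (List Char))) = [] ++ [cur.reverse] from rfl]
        rw [splitOnMax_go_headD_acc]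
        simp
      · rw [if_neg (by
          rw [show ([c] : List Char).isPrefixOf (ch :: rest) = ((c == ch) && List.isPrefixOf [] rest) from rfl]
          simp; exact fun h => hc h.symm)]
        rw [ih _ _ (by simpa using h)]
        simp [hc]

lemma splitOnMax_headD (c : Char) (s : List Char) :
    (PySem.Chars.splitOnMax s [c] 1).headD [] = s.takeWhile (fun a => !(a == c)) := by
  rw [PySem.Chars.splitOnMax, if_neg (by norm_num)]
  rw [show (1 : Int).toNat = 1 from rfl]
  rw [splitOnMax_go_headD c s (s.length + 1) [] (by omega)]
  simp

lemma pyGetD_last {α : Type} (ys : List α) (t : α) (d : α) :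
    PySem.List.pyGetD (ys ++ [t]) (-1) d = t := by
  simp [PySem.List.pyGetD, PySem.List.pyGet?, PySem.List.pyIdx?]

lemma pyGetD_penult {α : Type} (ys : List α) (p t : α) (d : α) :
    PySem.List.pyGetD (ys ++ [p, t]) (-2) d = p := by
  simp [PySem.List.pyGetD, PySem.List.pyGet?, PySem.List.pyIdx?]

lemma slice_last2 {α : Type} (ys : List α) (p t : α) :
    PySem.List.slice (ys ++ [p, t]) (some (-2)) none = [p, t] := by
  unfold PySem.List.slice PySem.List.clampIdx
  dsimp only
  rw [if_pos (by norm_num), if_neg (by simp)]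
  have ha : ((((ys ++ [p, t]).length : Int) + -2).toNat) = ys.length := by simp
  rw [ha, show ((ys ++ [p, t]).length - ys.length) = 2 from by simp, List.drop_left]
  rfl

lemma slice_last3 {α : Type} (ys : List α) (q p t : α) :
    PySem.List.slice (ys ++ [q, p, t]) (some (-3)) none = [q, p, t] := by
  unfold PySem.List.slice PySem.List.clampIdx
  dsimp only
  rw [if_pos (by norm_num), if_neg (by simp)]
  have ha : ((((ys ++ [q, p, t]).length : Int) + -3).toNat) = ys.length := by simp
  rw [ha, show ((ys ++ [q, p, t]).length - ys.length) = 3 from by simp, List.drop_left]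
  rfl

lemma join_pair (p t : List Char) : PySem.Chars.join ['.'] [p, t] = p ++ '.' :: t := by
  rw [PySem.Chars.join_cons_cons]
  simp [PySem.Chars.join, List.intercalate, List.intersperse]

lemma mem_prefixes_len_le (x : List Char) (h : PySem.Set.contains secondLevelPrefixesA x = true) :
    x.length ≤ 3 := by
  have hx : x ∈ ["ac".toList, "co".toList, "com".toList, "edu".toList, "gov".toList, "net".toList, "org".toList] := by
    have he : secondLevelPrefixesA
        = ["ac".toList, "co".toList, "com".toList, "edu".toList, "gov".toList, "net".toList, "org".toList] := by
      decide
    rw [PySem.Set.contains, he] at h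
    simpa using h
  simp only [List.mem_cons] at hx
  rcases hx with rfl | rfl | rfl | rfl | rfl | rfl | rfl | h' <;> first | decide | simp at h'

def labelsOf (n : List Char) : List (List Char) :=
  (PySem.Chars.splitOn n ['.']).filter (fun p => !p.isEmpty)

lemma labelsOf_dotfree (n : List Char) : ∀ x ∈ labelsOf n, '.' ∉ x := by
  intro x hx
  have hx' : x ∈ dotSplit [] n := by
    rw [labelsOf, splitOn_eq_dotSplit] at hx
    exact List.mem_of_mem_filter hx
  exact dotSplit_dotfree [] n (by simp) x hx'

lemma labelsOf_ne_nil (n : List Char) : ∀ x ∈ labelsOf n, x ≠ [] := by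
  intro x hx
  have := List.of_mem_filter hx
  simpa [List.isEmpty_iff] using this

lemma labelsOf_join (M : List (List Char)) (hM : M ≠ [])
    (hdf : ∀ x ∈ M, '.' ∉ x) (hne : ∀ x ∈ M, x ≠ []) :
    labelsOf (PySem.Chars.join ['.'] M) = M := by
  rw [labelsOf, splitOn_eq_dotSplit, dotSplit_join M hM hdf]
  rw [List.filter_eq_self]
  intro x hx
  simpa [List.isEmpty_iff] using hne x hx

lemma cutChain (s : List Char) :
    (PySem.Chars.splitOnMax
      ((PySem.Chars.splitOnMax
        ((PySem.Chars.splitOnMax s ['/'] 1).headD []) ['?'] 1).headD []) ['#'] 1).headD []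
      = s.takeWhile (fun c => !(c == '/' || c == '?' || c == '#')) := by
  rw [splitOnMax_headD, splitOnMax_headD, splitOnMax_headD,
      List.takeWhile_takeWhile, List.takeWhile_takeWhile]
  congr 1
  funext a
  by_cases h1 : a = '/' <;> by_cases h2 : a = '?' <;> by_cases h3 : a = '#' <;> simp [h1, h2, h3]

lemma pyGetD2_last (p t d : List Char) : PySem.List.pyGetD [p, t] (-1) d = t := by
  simpa using pyGetD_last [p] t d

lemma pyGetD2_penult (p t d : List Char) : PySem.List.pyGetD [p, t] (-2) d = p := by
  simpa using pyGetD_penult [] p t d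

lemma slice2_id (p t : List Char) : PySem.List.slice [p, t] (some (-2)) none = [p, t] := by
  simpa using slice_last2 [] p t

lemma pyGetD3_last (q p t d : List Char) : PySem.List.pyGetD [q, p, t] (-1) d = t := by
  simpa using pyGetD_last [q, p] t d

lemma pyGetD3_penult (q p t d : List Char) : PySem.List.pyGetD [q, p, t] (-2) d = p := by
  simpa using pyGetD_penult [q] p t d

lemma slice3_two (q p t : List Char) : PySem.List.slice [q, p, t] (some (-2)) none = [p, t] := by
  simpa using slice_last2 [q] p t

lemma pyGetD_last3 {α : Type} (ys : List α) (q p t : α) (d : α) :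
    PySem.List.pyGetD (ys ++ [q, p, t]) (-1) d = t := by
  simpa using pyGetD_last (ys ++ [q, p]) t d

lemma pyGetD_penult3 {α : Type} (ys : List α) (q p t : α) (d : α) :
    PySem.List.pyGetD (ys ++ [q, p, t]) (-2) d = p := by
  simpa using pyGetD_penult (ys ++ [q]) p t d

lemma rootAuxA_def (n : List Char) :
    rootAuxA n =
      if (labelsOf n).length ≤ 2 then n
      else if (PySem.List.pyGetD (labelsOf n) (-1) []).length == 2
              && PySem.Set.contains secondLevelPrefixesA (PySem.List.pyGetD (labelsOf n) (-2) [])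
              && 3 ≤ (labelsOf n).length then
        PySem.Chars.join ['.'] (PySem.List.slice (labelsOf n) (some (-3)) none)
      else PySem.Chars.join ['.'] (PySem.List.slice (labelsOf n) (some (-2)) none) := rfl

lemma tldAuxA_def (root : List Char) :
    tldAuxA root =
      if (labelsOf root).length ≤ 1 then []
      else if (PySem.List.pyGetD (labelsOf root) (-1) []).length == 2
              && (PySem.List.pyGetD (labelsOf root) (-2) []).length ≤ 3 then
        PySem.Chars.join ['.'] (PySem.List.slice (labelsOf root) (some (-2)) none)
      else PySem.List.pyGetD (labelsOf root) (-1) [] := rfl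

lemma tail_eq (n : List Char) :
    tldAuxA (rootAuxA n) = tldTailB (labelsOf n) := by
  rw [tldTailB]
  have hdf := labelsOf_dotfree n
  have hne := labelsOf_ne_nil n
  rcases hL : (labelsOf n).reverse with _ | ⟨t, _ | ⟨p, r⟩⟩
  · have h0 : labelsOf n = [] := by simpa using congrArg List.reverse hL
    rw [rootAuxA_def, h0, if_pos (by simp), tldAuxA_def, h0, if_pos (by simp)]
  · have h1 : labelsOf n = [t] := by simpa using congrArg List.reverse hL
    rw [rootAuxA_def, h1, if_pos (by simp), tldAuxA_def, h1, if_pos (by simp)]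
  · have hLeq : labelsOf n = r.reverse ++ [p, t] := by simpa using congrArg List.reverse hL
    have ht : t ∈ labelsOf n := by rw [hLeq]; simp
    have hp : p ∈ labelsOf n := by rw [hLeq]; simp
    rw [rootAuxA_def]
    match r, hL, hLeq with
    | [], hL, hLeq =>
      have hL2 : labelsOf n = [p, t] := by simpa using hLeq
      rw [hL2, if_pos (by simp), tldAuxA_def, hL2, if_neg (by simp)]
      rw [pyGetD2_last, pyGetD2_penult, slice2_id, join_pair]
    | q :: r', hL, hLeq =>
      have hL3 : labelsOf n = r'.reverse ++ [q, p, t] := by simpa using hLeq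
      have hq : q ∈ labelsOf n := by rw [hL3]; simp
      rw [hL3, if_neg (by simp)]
      rw [pyGetD_last3, pyGetD_penult3]
      by_cases hcond : (t.length == 2 && PySem.Set.contains secondLevelPrefixesA p
          && decide (3 ≤ (r'.reverse ++ [q, p, t] : List (List Char)).length)) = true
      · rw [if_pos hcond]
        simp only [Bool.and_eq_true, beq_iff_eq, decide_eq_true_eq] at hcond
        have ht2 : t.length = 2 := hcond.1.1
        have hp3 : p.length ≤ 3 := mem_prefixes_len_le p hcond.1.2
        rw [slice_last3, tldAuxA_def]
        rw [labelsOf_join [q, p, t] (by simp)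
            (by intro x hx; simp only [List.mem_cons, List.not_mem_nil, or_false] at hx
                rcases hx with rfl | rfl | rfl
                exacts [hdf _ hq, hdf _ hp, hdf _ ht])
            (by intro x hx; simp only [List.mem_cons, List.not_mem_nil, or_false] at hx
                rcases hx with rfl | rfl | rfl
                exacts [hne _ hq, hne _ hp, hne _ ht])]
        rw [if_neg (by simp)]
        rw [pyGetD3_last, pyGetD3_penult]
        rw [if_pos (by simp [ht2, hp3]), slice3_two, join_pair]
        simp [ht2, hp3]
      · rw [if_neg hcond]
        rw [show PySem.List.slice (r'.reverse ++ [q, p, t]) (some (-2)) none = [p, t] from by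
              simpa using slice_last2 (r'.reverse ++ [q]) p t]
        rw [join_pair, ← join_pair, tldAuxA_def]
        rw [labelsOf_join [p, t] (by simp)
            (by intro x hx; simp only [List.mem_cons, List.not_mem_nil, or_false] at hx
                rcases hx with rfl | rfl
                exacts [hdf _ hp, hdf _ ht])
            (by intro x hx; simp only [List.mem_cons, List.not_mem_nil, or_false] at hx
                rcases hx with rfl | rfl
                exacts [hne _ hp, hne _ ht])]
        rw [if_neg (by simp)]
        rw [pyGetD2_last, pyGetD2_penult, slice2_id, join_pair]

lemma normB_eq (v : List Char) :
    (if PySem.Chars.startswith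
          (PySem.Chars.stripChars
            ((removeprefixPy (removeprefixPy (PySem.Chars.lower (cleanTextA v)) "http://".toList) "https://".toList).takeWhile
              (fun c => !(c == '/' || c == '?' || c == '#'))) ['.']) "www.".toList
     then (PySem.Chars.stripChars
            ((removeprefixPy (removeprefixPy (PySem.Chars.lower (cleanTextA v)) "http://".toList) "https://".toList).takeWhile
              (fun c => !(c == '/' || c == '?' || c == '#'))) ['.']).drop 4
     else PySem.Chars.stripChars
            ((removeprefixPy (removeprefixPy (PySem.Chars.lower (cleanTextA v)) "http://".toList) "https://".toList).takeWhile
              (fun c => !(c == '/' || c == '?' || c == '#'))) ['.'])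
    = normaliseDomainA v := by
  rw [normaliseDomainA]
  dsimp only
  by_cases hd : PySem.Chars.lower (cleanTextA v) = []
  · rw [if_pos hd, hd]
    rfl
  · rw [if_neg hd]
    rw [← cutChain (removeprefixPy (removeprefixPy (PySem.Chars.lower (cleanTextA v)) "http://".toList) "https://".toList)]
    simp only [removeprefixPy]
    rfl

lemma tldChars_eq (v : List Char) :
    tldAuxA (extractRootDomainA v) = tldCharsB v := by
  rw [tldCharsB]
  rw [← cleanTextA.eq_def]
  rw [normB_eq v, extractRootDomainA]
  exact tail_eq (normaliseDomainA v)

-- ===== VERDICT (by name: the statement is the Claim_ definition above) =====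
theorem extract_domain_tld_spec : Claim_equal_extract_domain_tld := by
  intro domain _
  show extract_domain_tld domain = extract_domain_tld_alt domain
  rw [extract_domain_tld, extract_domain_tld_alt, tldChars_eq]
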